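-- pv_equiv track=rewrite | github.com/ahostbr/ShadowsAndShurikens | DevTools/python/log_error_digest.py | extract_key_segment
-- ===== SOURCE A (Python) =====
-- KEYWORDS = [
--     "Error:",
--     "Fatal:",
--     "ensure(",
--     "ensureMsgf",
--     "check(",
--     "checkf(",
--     "Assertion failed",
-- ]
--
-- def extract_key_segment(line: str):
--     lowest = None
--     for kw in KEYWORDS:
--         idx = line.find(kw)
--         if idx != -1 and (lowest is None or idx < lowest):
--             lowest = idx
--     if lowest is None:
--         return None
--     return line[lowest:].strip()
-- ===== SOURCE B (Python) =====
-- KEYWORDS = [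
--     "Error:",
--     "Fatal:",
--     "ensure(",
--     "ensureMsgf",
--     "check(",
--     "checkf(",
--     "Assertion failed",
-- ]
--
-- def extract_key_segment(line: str):
--     # Single left-to-right scan: stop at the first position where any keyword starts.
--     for i in range(len(line)):
--         if any(line.startswith(kw, i) for kw in KEYWORDS):
--             return line[i:].strip()
--     return None
-- ===== Notes on version B (the rewrite author's own statement) =====
-- stated objective: idiomatic
-- what changed: A runs seven independent str.find scans and keeps the minimum hit index; B makes one left-to-right scan over start positions and returns at the first position where any keyword starts, which is the same minimum.
import Mathlib
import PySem

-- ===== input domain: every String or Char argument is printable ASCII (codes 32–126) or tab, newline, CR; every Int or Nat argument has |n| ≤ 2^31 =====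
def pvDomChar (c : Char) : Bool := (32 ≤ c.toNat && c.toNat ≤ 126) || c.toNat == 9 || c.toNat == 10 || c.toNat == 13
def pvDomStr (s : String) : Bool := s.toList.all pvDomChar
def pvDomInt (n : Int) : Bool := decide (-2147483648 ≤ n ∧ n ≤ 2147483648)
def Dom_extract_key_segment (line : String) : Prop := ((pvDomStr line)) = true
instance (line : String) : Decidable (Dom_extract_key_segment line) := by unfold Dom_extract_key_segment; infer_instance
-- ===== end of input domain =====

-- B replaces A's seven independent str.find scans by one left-to-right scan that stops
-- at the first position where any keyword starts (same value; idiomatic single pass).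


def pvKeywords : List (List Char) :=
  ["Error:".toList, "Fatal:".toList, "ensure(".toList, "ensureMsgf".toList,
   "check(".toList, "checkf(".toList, "Assertion failed".toList]

-- ===== PORT A =====
-- loop body: if idx != -1 and (lowest is None or idx < lowest): lowest = idx
def pvStepA (s : List Char) (lowest : Option Int) (kw : List Char) : Option Int :=
  let idx := PySem.Chars.find s kw
  match lowest with
  | none => if idx ≠ -1 then some idx else none
  | some l => if idx ≠ -1 ∧ idx < l then some idx else some l

def extract_key_segment (line : String) : Option String :=
  let s := line.toList
  match pvKeywords.foldl (pvStepA s) none with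
  | none => none
  | some lowest => some (String.ofList (PySem.Chars.strip (PySem.Chars.slice s (some lowest) none)))

-- ===== PORT B =====
-- the 'for i in range(len(line))' scan over start positions, as structural recursion on the suffix
def pvScanB : List Char → Option (List Char)
  | [] => none
  | c :: rest =>
    if pvKeywords.any (fun kw => PySem.Chars.startswith (c :: rest) kw) then
      some (PySem.Chars.strip (c :: rest))
    else pvScanB rest

def extract_key_segment_alt (line : String) : Option String :=
  (pvScanB line.toList).map String.ofList

-- ===== PRECONDITION & SPEC =====
def Spec_extract_key_segment (line : String) (out : Option String) : Prop := out = extract_key_segment_alt line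
instance (line : String) (out : Option String) : Decidable (Spec_extract_key_segment line out) := by unfold Spec_extract_key_segment; infer_instance

-- ===== CLAIM (what is proved, stated in full; the proofs are below) =====
def Claim_equal_extract_key_segment : Prop := ∀ (line : String), Dom_extract_key_segment line → Spec_extract_key_segment line (extract_key_segment line)

-- ===== LEMMAS AND PROOFS =====

-- "some keyword starts at this suffix"
def pvQ (t : List Char) : Bool := pvKeywords.any (fun kw => PySem.Chars.startswith t kw)

lemma pvQ_nil : pvQ [] = false := by decide

lemma pvScanB_eq_none (s : List Char) (h : ∀ i, pvQ (s.drop i) = false) : pvScanB s = none := by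
  induction s with
  | nil => rfl
  | cons c rest ih =>
    have h0 := h 0
    simp only [List.drop_zero] at h0
    simp only [pvScanB, pvQ] at h0 ⊢
    rw [h0]
    simp only [Bool.false_eq_true, if_false]
    exact ih (fun i => h (i + 1))

lemma pvScanB_eq_some (s : List Char) (j : Nat) (hj : pvQ (s.drop j) = true)
    (hmin : ∀ i < j, pvQ (s.drop i) = false) :
    pvScanB s = some (PySem.Chars.strip (s.drop j)) := by
  induction s generalizing j with
  | nil => simp [List.drop_nil, pvQ_nil] at hj
  | cons c rest ih =>
    cases j with
    | zero =>
      simp only [List.drop_zero] at hj ⊢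
      simp only [pvScanB, pvQ] at hj ⊢
      rw [hj]; simp
    | succ j =>
      have h0 := hmin 0 (Nat.succ_pos j)
      simp only [List.drop_zero] at h0
      simp only [pvScanB, pvQ] at h0 ⊢
      rw [h0]
      simp only [Bool.false_eq_true, if_false]
      exact ih j hj (fun i hi => hmin (i + 1) (by omega))

lemma pvFoldA_none_iff (s : List Char) (kws : List (List Char)) (acc : Option Int) :
    kws.foldl (pvStepA s) acc = none ↔ acc = none ∧ ∀ kw ∈ kws, PySem.Chars.find s kw = -1 := by
  induction kws generalizing acc with
  | nil => simp
  | cons c t ih =>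
    simp only [List.foldl_cons, ih]
    constructor
    · rintro ⟨h1, h2⟩
      cases acc with
      | none =>
        by_cases hc : PySem.Chars.find s c = -1
        · exact ⟨rfl, by simpa [hc] using fun kw h => h2 kw h⟩
        · simp only [pvStepA] at h1; simp at h1; exact absurd h1 hc
      | some l =>
        simp only [pvStepA] at h1
        split at h1 <;> simp at h1
    · rintro ⟨rfl, h2⟩
      have hc := h2 c (by simp)
      refine ⟨by simp [pvStepA, hc], fun kw h => h2 kw (by simp [h])⟩

lemma pvFoldA_some (s : List Char) (kws : List (List Char)) (acc : Option Int) (m : Int)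
    (h : kws.foldl (pvStepA s) acc = some m) :
    (acc = some m ∨ ∃ kw ∈ kws, PySem.Chars.find s kw = m ∧ m ≠ -1) ∧
    (∀ kw ∈ kws, PySem.Chars.find s kw = -1 ∨ m ≤ PySem.Chars.find s kw) ∧
    (∀ a, acc = some a → m ≤ a) := by
  induction kws generalizing acc with
  | nil => simp at h; exact ⟨Or.inl (by simp [h]), by simp, fun a ha => by simp [h] at ha; omega⟩
  | cons c t ih =>
    simp only [List.foldl_cons] at h
    obtain ⟨hmem, hmin, hacc⟩ := ih (pvStepA s acc c) h
    simp only [pvStepA] at hmem hacc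
    cases acc with
    | none =>
      by_cases hc : PySem.Chars.find s c = -1
      · simp only [hc, ne_eq, not_true_eq_false, if_false] at hmem hacc
        refine ⟨?_, ?_, fun a ha => by simp at ha⟩
        · rcases hmem with h' | ⟨kw, hk, hv⟩
          · simp at h'
          · exact Or.inr ⟨kw, by simp [hk], hv⟩
        · intro kw hkw
          rcases List.mem_cons.mp hkw with h | hkw
          · rw [h]; exact Or.inl hc
          · exact hmin kw hkw
      · simp only [hc, ne_eq, not_false_eq_true, if_true] at hmem hacc
        have hmc : m ≤ PySem.Chars.find s c := hacc _ rfl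
        refine ⟨?_, ?_, fun a ha => by simp at ha⟩
        · rcases hmem with h' | ⟨kw, hk, hv⟩
          · exact Or.inr ⟨c, by simp, by simpa using h', by
              have := PySem.Chars.neg_one_le_find s c
              simp at h'; omega⟩
          · exact Or.inr ⟨kw, by simp [hk], hv⟩
        · intro kw hkw
          rcases List.mem_cons.mp hkw with h | hkw
          · rw [h]; exact Or.inr hmc
          · exact hmin kw hkw
    | some l =>
      by_cases hc : PySem.Chars.find s c ≠ -1 ∧ PySem.Chars.find s c < l
      · simp only [if_pos hc] at hmem hacc
        have hmc : m ≤ PySem.Chars.find s c := hacc _ rfl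
        refine ⟨?_, ?_, fun a ha => by simp at ha; omega⟩
        · rcases hmem with h' | ⟨kw, hk, hv⟩
          · exact Or.inr ⟨c, by simp, by simpa using h', by
              simp at h'; omega⟩
          · exact Or.inr ⟨kw, by simp [hk], hv⟩
        · intro kw hkw
          rcases List.mem_cons.mp hkw with h | hkw
          · rw [h]; exact Or.inr hmc
          · exact hmin kw hkw
      · simp only [if_neg hc] at hmem hacc
        have hml : m ≤ l := hacc _ rfl
        refine ⟨?_, ?_, fun a ha => by simp at ha; omega⟩
        · rcases hmem with h' | ⟨kw, hk, hv⟩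
          · exact Or.inl h'
          · exact Or.inr ⟨kw, by simp [hk], hv⟩
        · intro kw hkw
          rcases List.mem_cons.mp hkw with h | hkw
          · rw [h]
            rw [not_and_or, not_not, not_lt] at hc
            rcases hc with h1 | h2
            · exact Or.inl h1
            · exact Or.inr (le_trans hml h2)
          · exact hmin kw hkw

-- a keyword matching at position i means its find is defined and ≤ bounds via find_spec
lemma pvQ_true_iff (s : List Char) (i : Nat) :
    pvQ (s.drop i) = true ↔ ∃ kw ∈ pvKeywords, kw <+: s.drop i := by
  simp [pvQ, List.any_eq_true, PySem.Chars.startswith_iff]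

lemma pvMain (s : List Char) :
    (match pvKeywords.foldl (pvStepA s) none with
     | none => none
     | some lowest => some (String.ofList (PySem.Chars.strip (PySem.Chars.slice s (some lowest) none)))) =
    (pvScanB s).map String.ofList := by
  cases hfold : pvKeywords.foldl (pvStepA s) none with
  | none =>
    have hall := (pvFoldA_none_iff s pvKeywords none).mp hfold
    have hnone : ∀ i, pvQ (s.drop i) = false := by
      intro i
      by_contra hq
      rw [Bool.not_eq_false, pvQ_true_iff] at hq
      obtain ⟨kw, hkw, hpre⟩ := hq
      have hin : PySem.Chars.isIn kw s = true :=
        (PySem.Chars.exists_prefix_drop_iff_isIn kw s).mp ⟨i, hpre⟩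
      have hne : PySem.Chars.find s kw ≠ -1 :=
        (PySem.Chars.find_ne_neg_one_iff s kw).mpr ((PySem.Chars.isIn_iff_infix kw s).mp hin)
      exact hne (hall.2 kw hkw)
    rw [pvScanB_eq_none s hnone]
    rfl
  | some m =>
    obtain ⟨hmem, hmin, -⟩ := pvFoldA_some s pvKeywords none m hfold
    rcases hmem with h' | ⟨kw₀, hkw₀, hfind₀, hm⟩
    · simp at h'
    · have hm0 : 0 ≤ m := by
        have := PySem.Chars.neg_one_le_find s kw₀
        omega
      have hfind₀' : 0 ≤ PySem.Chars.find s kw₀ := by omega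
      have hspec := PySem.Chars.find_spec hfind₀'
      rw [hfind₀] at hspec
      have hQj : pvQ (s.drop m.toNat) = true := by
        rw [pvQ_true_iff]
        exact ⟨kw₀, hkw₀, hspec.1⟩
      have hQlt : ∀ i < m.toNat, pvQ (s.drop i) = false := by
        intro i hi
        by_contra hq
        rw [Bool.not_eq_false, pvQ_true_iff] at hq
        obtain ⟨kw, hkw, hpre⟩ := hq
        have hin : PySem.Chars.isIn kw s = true :=
          (PySem.Chars.exists_prefix_drop_iff_isIn kw s).mp ⟨i, hpre⟩
        have hne : PySem.Chars.find s kw ≠ -1 :=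
          (PySem.Chars.find_ne_neg_one_iff s kw).mpr ((PySem.Chars.isIn_iff_infix kw s).mp hin)
        have hmk : m ≤ PySem.Chars.find s kw := (hmin kw hkw).resolve_left hne
        have hkpos : 0 ≤ PySem.Chars.find s kw := by omega
        exact (PySem.Chars.find_spec hkpos).2 i (by omega) hpre
      rw [pvScanB_eq_some s m.toNat hQj hQlt]
      simp [PySem.List.slice_from s hm0]

-- ===== VERDICT (by name: the statement is the Claim_ definition above) =====
theorem extract_key_segment_spec : Claim_equal_extract_key_segment := by
  intro line _
  unfold Spec_extract_key_segment extract_key_segment extract_key_segment_alt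
  exact pvMain line.toList
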